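-- pv_equiv track=rewrite | github.com/mmd00Z/CodePilot2 | 14-saat_sheni.py | chek_ways
-- ===== SOURCE A (Python) =====
-- def chek_ways(l, i, last_i, n, left_time, m):
--     if i >= len(l):
--         return True
--
--     diff = l[i] - l[last_i]
--     new_left_time = left_time - diff if n % 2 == 0 else left_time + diff
--
--     if new_left_time < 0 or new_left_time > m:
--         return False
--
--     # pass i , select i: last_i = i, n++ (n select)
--     return chek_ways(l, i+1, last_i, n, left_time, m) or chek_ways(l, i+1, i, n+1, new_left_time, m)
-- ===== SOURCE B (Python) =====
-- def chek_ways(l, i, last_i, n, left_time, m):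
--     if i >= len(l):
--         return True
--     states = {(last_i, n % 2, left_time)}
--     for j in range(i, len(l)):
--         nxt = set()
--         for (li, p, lt) in states:
--             diff = l[j] - l[li]
--             nlt = lt - diff if p == 0 else lt + diff
--             if 0 <= nlt <= m:
--                 nxt.add((li, p, lt))
--                 nxt.add((j, 1 - p, nlt))
--         states = nxt
--         if not states:
--             return False
--     return True
-- ===== Notes on version B (the rewrite author's own statement) =====
-- stated objective: alternative
-- what changed: Replaces the two-way branching recursion with an iterative level-by-level BFS over the set of distinct (last_i, n%2, left_time) states, deduplicating equivalent branches.
import Mathlib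
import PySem

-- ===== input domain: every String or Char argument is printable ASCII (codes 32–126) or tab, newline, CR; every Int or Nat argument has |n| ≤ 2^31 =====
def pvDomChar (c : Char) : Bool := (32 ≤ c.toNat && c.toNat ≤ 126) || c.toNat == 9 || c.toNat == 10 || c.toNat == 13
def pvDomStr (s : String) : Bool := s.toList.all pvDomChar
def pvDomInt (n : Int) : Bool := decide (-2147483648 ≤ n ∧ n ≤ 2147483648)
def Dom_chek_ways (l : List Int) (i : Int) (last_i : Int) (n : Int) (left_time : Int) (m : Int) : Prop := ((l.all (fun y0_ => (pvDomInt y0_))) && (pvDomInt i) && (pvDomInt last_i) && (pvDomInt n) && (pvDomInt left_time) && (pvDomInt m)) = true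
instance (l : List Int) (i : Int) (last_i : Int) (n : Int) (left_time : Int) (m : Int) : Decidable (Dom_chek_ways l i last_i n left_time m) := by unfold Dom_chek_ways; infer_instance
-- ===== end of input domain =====

-- B replaces A's two-way branching recursion by an iterative BFS over the set of
-- distinct (last_i, parity, left_time) states, level by level over the indices.

-- ===== PORT A =====
def chek_ways (l : List Int) (i : Int) (last_i : Int) (n : Int) (left_time : Int) (m : Int) : Bool :=
  if _h : (l.length : Int) ≤ i then true
  else
    let diff := PySem.List.pyGetD l i 0 - PySem.List.pyGetD l last_i 0
    let new_left_time := if PySem.Int.mod n 2 = 0 then left_time - diff else left_time + diff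
    if new_left_time < 0 ∨ m < new_left_time then false
    else chek_ways l (i+1) last_i n left_time m || chek_ways l (i+1) i (n+1) new_left_time m
termination_by ((l.length : Int) - i).toNat
decreasing_by all_goals omega

-- ===== PORT B =====
-- B-side helpers: the body of B's inner loop (alive test and the "select j" successor).
def pvAlive (l : List Int) (m : Int) (j : Int) (s : Int × Int × Int) : Bool :=
  let diff := PySem.List.pyGetD l j 0 - PySem.List.pyGetD l s.1 0
  let nlt := if s.2.1 = 0 then s.2.2 - diff else s.2.2 + diff
  decide (0 ≤ nlt ∧ nlt ≤ m)

def pvNext (l : List Int) (j : Int) (s : Int × Int × Int) : Int × Int × Int :=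
  let diff := PySem.List.pyGetD l j 0 - PySem.List.pyGetD l s.1 0
  let nlt := if s.2.1 = 0 then s.2.2 - diff else s.2.2 + diff
  (j, 1 - s.2.1, nlt)

-- one pass of B's inner loop: nxt = { s, next s | s ∈ states alive }
def pvStep (l : List Int) (m : Int) (j : Int) (states : PySem.Set (Int × Int × Int)) :
    PySem.Set (Int × Int × Int) :=
  states.foldl
    (fun nxt s =>
      if pvAlive l m j s then PySem.Set.add (PySem.Set.add nxt s) (pvNext l j s) else nxt)
    PySem.Set.empty

-- B's outer loop "for j in range(i, len(l))" with the early 'return False' on an empty level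
def pvBfs (l : List Int) (m : Int) (j : Int) (states : PySem.Set (Int × Int × Int)) : Bool :=
  if _h : (l.length : Int) ≤ j then true
  else
    let nxt := pvStep l m j states
    if nxt.isEmpty then false else pvBfs l m (j+1) nxt
termination_by ((l.length : Int) - j).toNat
decreasing_by all_goals omega

def chek_ways_alt (l : List Int) (i : Int) (last_i : Int) (n : Int) (left_time : Int) (m : Int) : Bool :=
  if (l.length : Int) ≤ i then true
  else pvBfs l m i (PySem.Set.ofList [(last_i, PySem.Int.mod n 2, left_time)])

-- ===== PRECONDITION & SPEC =====
-- Pre_ excludes exactly the inputs on which Python A raises IndexError: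
-- when i < len(l), A immediately indexes l[i] and l[last_i], so both must be valid
-- (possibly negative) Python indices; every index reached later in the recursion then is.
def Pre_chek_ways (l : List Int) (i : Int) (last_i : Int) (n : Int) (left_time : Int) (m : Int) : Prop :=
  i < (l.length : Int) →
    (-(l.length : Int) ≤ i ∧ -(l.length : Int) ≤ last_i ∧ last_i < (l.length : Int))

instance (l : List Int) (i : Int) (last_i : Int) (n : Int) (left_time : Int) (m : Int) : Decidable (Pre_chek_ways l i last_i n left_time m) := by unfold Pre_chek_ways; infer_instance

def pvWitness_chek_ways : List Int × Int × Int × Int × Int × Int := ([1, 2, 4], 1, 0, 1, 5, 10)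

def Spec_chek_ways (l : List Int) (i : Int) (last_i : Int) (n : Int) (left_time : Int) (m : Int) (out : Bool) : Prop := out = chek_ways_alt l i last_i n left_time m
instance (l : List Int) (i : Int) (last_i : Int) (n : Int) (left_time : Int) (m : Int) (out : Bool) : Decidable (Spec_chek_ways l i last_i n left_time m out) := by unfold Spec_chek_ways; infer_instance

-- ===== CLAIM (what is proved, stated in full; the proofs are below) =====
def Claim_equal_chek_ways : Prop := ∀ (l : List Int) (i : Int) (last_i : Int) (n : Int) (left_time : Int) (m : Int), Dom_chek_ways l i last_i n left_time m → Pre_chek_ways l i last_i n left_time m → Spec_chek_ways l i last_i n left_time m (chek_ways l i last_i n left_time m)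

-- ===== LEMMAS AND PROOFS =====

-- A's recursion, reformulated on a single state (last_i, parity, left_time); the bridge
-- between the two ports.
def pvArec (l : List Int) (m : Int) (j : Int) (s : Int × Int × Int) : Bool :=
  if _h : (l.length : Int) ≤ j then true
  else if pvAlive l m j s then
    pvArec l m (j+1) s || pvArec l m (j+1) (pvNext l j s)
  else false
termination_by ((l.length : Int) - j).toNat
decreasing_by all_goals omega

theorem pv_mod_two_succ (n : Int) : PySem.Int.mod (n+1) 2 = 1 - PySem.Int.mod n 2 := by
  simp only [PySem.Int.mod_eq_emod_of_pos (show (0:Int) < 2 by omega)]; omega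

theorem chek_ways_eq_pvArec (l : List Int) (m : Int) :
    ∀ (i last_i n left_time : Int),
      chek_ways l i last_i n left_time m = pvArec l m i (last_i, PySem.Int.mod n 2, left_time) := by
  have H : ∀ (k : Nat) (i last_i n left_time : Int), ((l.length : Int) - i).toNat ≤ k →
      chek_ways l i last_i n left_time m = pvArec l m i (last_i, PySem.Int.mod n 2, left_time) := by
    intro k
    induction k with
    | zero =>
      intro i last_i n left_time hk
      have h : (l.length : Int) ≤ i := by omega
      rw [chek_ways, pvArec]
      simp [h]
    | succ k ih =>
      intro i last_i n left_time hk
      by_cases h : (l.length : Int) ≤ i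
      · rw [chek_ways, pvArec]; simp [h]
      · rw [chek_ways, pvArec]
        simp only [h, dif_neg, not_false_iff, pvAlive, pvNext]
        set diff := PySem.List.pyGetD l i 0 - PySem.List.pyGetD l last_i 0 with hdiff
        set nlt := (if PySem.Int.mod n 2 = 0 then left_time - diff else left_time + diff) with hnlt
        by_cases hb : nlt < 0 ∨ m < nlt
        · rw [if_pos hb, if_neg (by simp only [decide_eq_true_eq]; omega)]
        · rw [if_neg hb, if_pos (by simp only [decide_eq_true_eq]; omega),
            ih (i+1) last_i n left_time (by omega), ih (i+1) i (n+1) nlt (by omega),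
            pv_mod_two_succ]
  intro i last_i n left_time
  exact H ((l.length : Int) - i).toNat i last_i n left_time le_rfl

theorem mem_pvStep (l : List Int) (m j : Int) (S : PySem.Set (Int × Int × Int))
    (t : Int × Int × Int) :
    t ∈ pvStep l m j S ↔ ∃ s ∈ S, pvAlive l m j s = true ∧ (t = s ∨ t = pvNext l j s) := by
  have H : ∀ (L acc : List (Int × Int × Int)),
      t ∈ L.foldl
          (fun nxt s =>
            if pvAlive l m j s then PySem.Set.add (PySem.Set.add nxt s) (pvNext l j s) else nxt)
          acc
        ↔ t ∈ acc ∨ ∃ s ∈ L, pvAlive l m j s = true ∧ (t = s ∨ t = pvNext l j s) := by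
    intro L
    induction L with
    | nil => intro acc; simp
    | cons x xs ih =>
      intro acc
      simp only [List.foldl_cons, ih, List.mem_cons]
      by_cases hx : pvAlive l m j x = true
      · rw [if_pos hx]
        simp only [PySem.Set.mem_add]
        constructor
        · rintro (((ha | rfl) | rfl) | ⟨s, hs, hal, hts⟩)
          · exact Or.inl ha
          · exact Or.inr ⟨t, Or.inl rfl, hx, Or.inl rfl⟩
          · exact Or.inr ⟨x, Or.inl rfl, hx, Or.inr rfl⟩
          · exact Or.inr ⟨s, Or.inr hs, hal, hts⟩
        · rintro (ha | ⟨s, (rfl | hs), hal, hts⟩)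
          · exact Or.inl (Or.inl (Or.inl ha))
          · rcases hts with rfl | rfl
            · exact Or.inl (Or.inl (Or.inr rfl))
            · exact Or.inl (Or.inr rfl)
          · exact Or.inr ⟨s, hs, hal, hts⟩
      · rw [if_neg hx]
        constructor
        · rintro (ha | ⟨s, hs, hal, hts⟩)
          · exact Or.inl ha
          · exact Or.inr ⟨s, Or.inr hs, hal, hts⟩
        · rintro (ha | ⟨s, (rfl | hs), hal, hts⟩)
          · exact Or.inl ha
          · exact absurd hal hx
          · exact Or.inr ⟨s, hs, hal, hts⟩
  simpa [PySem.Set.empty] using H S PySem.Set.empty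

theorem pvBfs_iff (l : List Int) (m : Int) :
    ∀ (j : Int) (S : PySem.Set (Int × Int × Int)), S ≠ [] →
      (pvBfs l m j S = true ↔ ∃ s ∈ S, pvArec l m j s = true) := by
  have H : ∀ (k : Nat) (j : Int) (S : PySem.Set (Int × Int × Int)),
      ((l.length : Int) - j).toNat ≤ k → S ≠ [] →
      (pvBfs l m j S = true ↔ ∃ s ∈ S, pvArec l m j s = true) := by
    intro k
    induction k with
    | zero =>
      intro j S hk hS
      have h : (l.length : Int) ≤ j := by omega
      constructor
      · intro _
        obtain ⟨x, hx⟩ := List.exists_mem_of_ne_nil S hS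
        exact ⟨x, hx, by rw [pvArec]; simp [h]⟩
      · intro _; rw [pvBfs]; simp [h]
    | succ k ih =>
      intro j S hk hS
      by_cases h : (l.length : Int) ≤ j
      · constructor
        · intro _
          obtain ⟨x, hx⟩ := List.exists_mem_of_ne_nil S hS
          exact ⟨x, hx, by rw [pvArec]; simp [h]⟩
        · intro _; rw [pvBfs]; simp [h]
      · have key : (∃ s ∈ S, pvArec l m j s = true) ↔
            ∃ t ∈ pvStep l m j S, pvArec l m (j+1) t = true := by
          constructor
          · rintro ⟨s, hs, hA⟩
            rw [pvArec, dif_neg h] at hA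
            by_cases ha : pvAlive l m j s = true
            · rw [if_pos ha] at hA
              rcases Bool.or_eq_true_iff.1 hA with h1 | h2
              · exact ⟨s, (mem_pvStep l m j S s).2 ⟨s, hs, ha, Or.inl rfl⟩, h1⟩
              · exact ⟨pvNext l j s, (mem_pvStep l m j S _).2 ⟨s, hs, ha, Or.inr rfl⟩, h2⟩
            · rw [if_neg ha] at hA
              exact absurd hA (by simp)
          · rintro ⟨t, ht, hA⟩
            obtain ⟨s, hs, ha, hts⟩ := (mem_pvStep l m j S t).1 ht
            refine ⟨s, hs, ?_⟩
            rw [pvArec, dif_neg h, if_pos ha]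
            rcases hts with rfl | rfl
            · exact Bool.or_eq_true_iff.2 (Or.inl hA)
            · exact Bool.or_eq_true_iff.2 (Or.inr hA)
        rw [pvBfs, dif_neg h]
        by_cases he : (pvStep l m j S).isEmpty
        · have hnil : pvStep l m j S = [] := List.isEmpty_iff.1 he
          rw [if_pos he]
          constructor
          · intro hfalse; exact absurd hfalse (by simp)
          · intro hex
            obtain ⟨t, ht, _⟩ := key.1 hex
            rw [hnil] at ht
            exact absurd ht (List.not_mem_nil)
        · have hnil : pvStep l m j S ≠ [] := fun hh => he (by simp [hh])
          rw [if_neg he, ih (j+1) (pvStep l m j S) (by omega) hnil]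
          exact key.symm
  intro j S hS
  exact H ((l.length : Int) - j).toNat j S le_rfl hS

-- ===== VERDICT (by name: the statement is the Claim_ definition above) =====
theorem chek_ways_spec : Claim_equal_chek_ways := by
  intro l i last_i n left_time m _hdom _hpre
  unfold Spec_chek_ways chek_ways_alt
  by_cases h : (l.length : Int) ≤ i
  · rw [chek_ways, if_pos h]; simp [h]
  · rw [if_neg h, chek_ways_eq_pvArec]
    have hS : PySem.Set.ofList [(last_i, PySem.Int.mod n 2, left_time)]
        = [(last_i, PySem.Int.mod n 2, left_time)] := rfl
    rw [hS, Bool.eq_iff_iff,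
      pvBfs_iff l m i [(last_i, PySem.Int.mod n 2, left_time)] (by simp)]
    simp
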